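-- pv_equiv track=rewrite | github.com/ai4curation/ai-gene-review | scripts/fix_core_functions.py | add_generic_support
-- ===== SOURCE A (Python) =====
-- def add_generic_support(core_function, gene_symbol, references):
--     """Add generic supported_by if missing."""
--     if 'supported_by' not in core_function or not core_function['supported_by']:
--         # Find relevant references
--         supported_by = []
--
--         # Look for PMIDs in references
--         pmids = [ref for ref in references if ref.get('id', '').startswith('PMID:')]
--         files = [ref for ref in references if ref.get('id', '').startswith('file:')]
--
--         # Add first PMID if available
--         if pmids:
--             pmid = pmids[0]
--             supported_by.append({
--                 'reference_id': pmid['id'],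
--                 'supporting_text': f"Evidence supporting {gene_symbol} function in the described biological processes"
--             })
--
--         # Add file reference if available
--         if files:
--             file_ref = files[0]
--             supported_by.append({
--                 'reference_id': file_ref['id'],
--                 'supporting_text': f"Bioinformatics and literature analysis supporting {gene_symbol} core functions"
--             })
--
--         # If no references found, add a generic one
--         if not supported_by:
--             supported_by.append({
--                 'reference_id': 'TEMP:literature_review',
--                 'supporting_text': f"Literature evidence supporting {gene_symbol} function - specific references to be added"
--             })
--
--         core_function['supported_by'] = supported_by
--
--     return core_function
-- ===== SOURCE B (Python) =====
-- def add_generic_support(core_function, gene_symbol, references):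
--     """Add generic supported_by if missing (single pass over references)."""
--     if core_function.get('supported_by'):
--         return core_function
--     pmid_id = None
--     file_id = None
--     for ref in references:
--         rid = ref.get('id', '')
--         if pmid_id is None and rid.startswith('PMID:'):
--             pmid_id = rid
--         if file_id is None and rid.startswith('file:'):
--             file_id = rid
--         if pmid_id is not None and file_id is not None:
--             break
--     supported_by = []
--     if pmid_id is not None:
--         supported_by.append({
--             'reference_id': pmid_id,
--             'supporting_text': f"Evidence supporting {gene_symbol} function in the described biological processes"
--         })
--     if file_id is not None:
--         supported_by.append({
--             'reference_id': file_id,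
--             'supporting_text': f"Bioinformatics and literature analysis supporting {gene_symbol} core functions"
--         })
--     if not supported_by:
--         supported_by.append({
--             'reference_id': 'TEMP:literature_review',
--             'supporting_text': f"Literature evidence supporting {gene_symbol} function - specific references to be added"
--         })
--     core_function['supported_by'] = supported_by
--     return core_function
-- ===== Notes on version B (the rewrite author's own statement) =====
-- stated objective: alternative
-- what changed: Replaces the two full filtering passes over references (one per prefix) with a single early-exit scan that records the first 'PMID:' and first 'file:' ids and stops once both are found, then builds supported_by from those two optional ids.
import Mathlib
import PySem

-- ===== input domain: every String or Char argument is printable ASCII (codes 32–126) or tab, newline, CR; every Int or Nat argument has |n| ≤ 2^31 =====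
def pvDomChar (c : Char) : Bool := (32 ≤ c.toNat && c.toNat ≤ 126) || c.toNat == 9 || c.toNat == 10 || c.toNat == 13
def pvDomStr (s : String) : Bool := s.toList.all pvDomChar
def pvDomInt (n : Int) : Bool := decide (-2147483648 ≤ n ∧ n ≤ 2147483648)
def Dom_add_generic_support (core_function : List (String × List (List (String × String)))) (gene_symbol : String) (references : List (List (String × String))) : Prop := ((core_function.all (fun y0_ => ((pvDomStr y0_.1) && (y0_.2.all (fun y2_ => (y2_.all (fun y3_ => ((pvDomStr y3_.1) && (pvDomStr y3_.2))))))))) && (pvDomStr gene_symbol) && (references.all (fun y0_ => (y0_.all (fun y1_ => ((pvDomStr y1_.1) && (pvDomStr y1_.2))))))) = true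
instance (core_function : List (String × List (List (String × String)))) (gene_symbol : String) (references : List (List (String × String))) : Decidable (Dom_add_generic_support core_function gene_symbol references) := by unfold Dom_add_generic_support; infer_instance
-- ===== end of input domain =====

-- B replaces A's two filtering passes over references with one early-exit scan for the first
-- PMID/file ids (alternative decomposition, same cost class). A mutates core_function in place;
-- both ports model the RETURNED dict (B performs the same mutation in Python).

-- ===== PORT A =====
-- ref.get('id', '')
def pvRefId (ref : List (String × String)) : String := (PySem.Dict.mk ref).getD "id" ""

def add_generic_support (core_function : List (String × List (List (String × String)))) (gene_symbol : String) (references : List (List (String × String))) : List (String × List (List (String × String))) :=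
  let d := PySem.Dict.mk core_function
  if !d.contains "supported_by" || (d.getD "supported_by" []).isEmpty then
    let supported_by : List (List (String × String)) := []
    let pmids := references.filter (fun ref => PySem.Str.startswith (pvRefId ref) "PMID:")
    let files := references.filter (fun ref => PySem.Str.startswith (pvRefId ref) "file:")
    let supported_by :=
      match pmids with
      -- pmid['id'] cannot raise here: the filter matched, so 'id' is present and equals pvRefId pmid
      | pmid :: _ => supported_by ++ [[("reference_id", pvRefId pmid),
          ("supporting_text", "Evidence supporting " ++ gene_symbol ++ " function in the described biological processes")]]
      | [] => supported_by
    let supported_by :=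
      match files with
      | file_ref :: _ => supported_by ++ [[("reference_id", pvRefId file_ref),
          ("supporting_text", "Bioinformatics and literature analysis supporting " ++ gene_symbol ++ " core functions")]]
      | [] => supported_by
    let supported_by :=
      if supported_by.isEmpty then
        supported_by ++ [[("reference_id", "TEMP:literature_review"),
          ("supporting_text", "Literature evidence supporting " ++ gene_symbol ++ " function - specific references to be added")]]
      else supported_by
    (d.insert "supported_by" supported_by).items
  else
    core_function

-- ===== PORT B =====
-- the single scan of Source B: first PMID id / first file id, early exit once both are found
def agsScan : List (List (String × String)) → Option String → Option String → Option String × Option String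
  | [], pmid_id, file_id => (pmid_id, file_id)
  | ref :: rest, pmid_id, file_id =>
      let rid := pvRefId ref
      let pmid_id := if pmid_id.isNone && PySem.Str.startswith rid "PMID:" then some rid else pmid_id
      let file_id := if file_id.isNone && PySem.Str.startswith rid "file:" then some rid else file_id
      if pmid_id.isSome && file_id.isSome then (pmid_id, file_id)
      else agsScan rest pmid_id file_id

def add_generic_support_alt (core_function : List (String × List (List (String × String)))) (gene_symbol : String) (references : List (List (String × String))) : List (String × List (List (String × String))) :=
  let d := PySem.Dict.mk core_function
  match d.get? "supported_by" with
  | some (_ :: _) => core_function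
  | _ =>
    let (pmid_id, file_id) := agsScan references none none
    let supported_by :=
      (match pmid_id with
       | some rid => [[("reference_id", rid),
           ("supporting_text", "Evidence supporting " ++ gene_symbol ++ " function in the described biological processes")]]
       | none => []) ++
      (match file_id with
       | some rid => [[("reference_id", rid),
           ("supporting_text", "Bioinformatics and literature analysis supporting " ++ gene_symbol ++ " core functions")]]
       | none => [])
    let supported_by :=
      if supported_by.isEmpty then
        [[("reference_id", "TEMP:literature_review"),
          ("supporting_text", "Literature evidence supporting " ++ gene_symbol ++ " function - specific references to be added")]]
      else supported_by
    (d.insert "supported_by" supported_by).items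

-- ===== PRECONDITION & SPEC =====
def Spec_add_generic_support (core_function : List (String × List (List (String × String)))) (gene_symbol : String) (references : List (List (String × String))) (out : List (String × List (List (String × String)))) : Prop := out = add_generic_support_alt core_function gene_symbol references
instance (core_function : List (String × List (List (String × String)))) (gene_symbol : String) (references : List (List (String × String))) (out : List (String × List (List (String × String)))) : Decidable (Spec_add_generic_support core_function gene_symbol references out) := by unfold Spec_add_generic_support; infer_instance

-- ===== CLAIM (what is proved, stated in full; the proofs are below) =====
def Claim_equal_add_generic_support : Prop := ∀ (core_function : List (String × List (List (String × String)))) (gene_symbol : String) (references : List (List (String × String))), Dom_add_generic_support core_function gene_symbol references → Spec_add_generic_support core_function gene_symbol references (add_generic_support core_function gene_symbol references)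

-- ===== LEMMAS AND PROOFS =====

-- first reference id with the given prefix, as A computes it (head of the filter)
def pvFirst (pre : String) (refs : List (List (String × String))) : Option String :=
  ((refs.filter (fun ref => PySem.Str.startswith (pvRefId ref) pre)).head?).map pvRefId

theorem agsScan_eq (refs : List (List (String × String))) :
    ∀ p f : Option String, agsScan refs p f = (p.or (pvFirst "PMID:" refs), f.or (pvFirst "file:" refs)) := by
  induction refs with
  | nil => intro p f; simp [agsScan, pvFirst]
  | cons ref rest ih =>
      intro p f
      simp only [agsScan, pvFirst, List.filter_cons, PySem.Str.startswith_eq]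
      by_cases hp : PySem.Chars.startswith (pvRefId ref).toList ['P', 'M', 'I', 'D', ':'] = true <;>
      by_cases hf : PySem.Chars.startswith (pvRefId ref).toList ['f', 'i', 'l', 'e', ':'] = true <;>
      cases p <;> cases f <;>
      simp [hp, hf, ih, pvFirst, Option.or]

-- ===== VERDICT (by name: the statement is the Claim_ definition above) =====
theorem add_generic_support_spec : Claim_equal_add_generic_support := by
  intro cf gs refs _
  unfold Spec_add_generic_support add_generic_support add_generic_support_alt
  rw [agsScan_eq]
  rcases h : (PySem.Dict.mk cf).get? "supported_by" with _ | (_ | ⟨v, vs⟩) <;>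
  rcases hp : refs.filter (fun ref => PySem.Str.startswith (pvRefId ref) "PMID:") with _ | ⟨pm, pms⟩ <;>
  rcases hq : refs.filter (fun ref => PySem.Str.startswith (pvRefId ref) "file:") with _ | ⟨fl, fls⟩ <;>
  simp only [pvFirst, hp, hq] <;>
  simp [PySem.Dict.contains_eq_isSome_get?, PySem.Dict.getD_eq_get?_getD, h, Option.or]
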